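-- pv_equiv track=rewrite | github.com/ElshadaiK/Competitive-Programming | red_and_blue.py | maximizer
-- ===== SOURCE A (Python) =====
-- def maximizer(reds, blues):
--     red_sum = 0
--     blue_sum = 0
--
--     max_red = 0
--     max_blue = 0
--
--     for red in reds:
--         red_sum += int(red)
--         max_red = max(max_red, red_sum)
--     for blue in blues:
--         blue_sum += int(blue)
--         max_blue = max(max_blue, blue_sum)
--
--     return max_blue+max_red
-- ===== SOURCE B (Python) =====
-- def maximizer(reds, blues):
--     # Divide and conquer: solve(xs) = (sum of xs, max(0, max prefix sum of xs)).
--     # Combine rule: a prefix of L+R is a prefix of L, or all of L plus a prefix of R.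
--     def solve(xs):
--         if not xs:
--             return (0, 0)
--         if len(xs) == 1:
--             v = int(xs[0])
--             return (v, max(0, v))
--         mid = len(xs) // 2
--         sl, ml = solve(xs[:mid])
--         sr, mr = solve(xs[mid:])
--         return (sl + sr, max(ml, sl + mr))
--     return solve(reds)[1] + solve(blues)[1]
-- ===== Notes on version B (the rewrite author's own statement) =====
-- stated objective: alternative
-- what changed: Replaces A's fused left-to-right running-sum/running-max loops with a divide-and-conquer recursion that returns (total sum, clamped max prefix sum) for each half and merges them with max(ml, sl+mr).
import Mathlib
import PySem

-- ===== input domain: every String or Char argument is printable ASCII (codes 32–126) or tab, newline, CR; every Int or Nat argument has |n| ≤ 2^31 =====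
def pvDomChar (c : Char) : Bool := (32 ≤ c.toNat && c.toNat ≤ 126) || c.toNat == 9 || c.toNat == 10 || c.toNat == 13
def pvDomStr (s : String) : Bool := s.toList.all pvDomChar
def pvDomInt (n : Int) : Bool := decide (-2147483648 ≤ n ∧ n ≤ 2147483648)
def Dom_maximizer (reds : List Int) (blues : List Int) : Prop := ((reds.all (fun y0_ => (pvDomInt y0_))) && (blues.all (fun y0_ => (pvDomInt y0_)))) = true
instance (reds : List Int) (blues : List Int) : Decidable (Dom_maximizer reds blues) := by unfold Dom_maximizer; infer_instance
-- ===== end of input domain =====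

-- B replaces A's fused left-to-right running-sum/running-max loops with a
-- divide-and-conquer recursion returning (sum, clamped max prefix sum) per half.


-- ===== PORT A =====
-- A: two fused loops, each carrying (running sum, running max) state.
def maximizer (reds : List Int) (blues : List Int) : Int :=
  let s1 := reds.foldl (fun (p : Int × Int) red => (p.1 + red, max p.2 (p.1 + red))) (0, 0)
  let s2 := blues.foldl (fun (p : Int × Int) blue => (p.1 + blue, max p.2 (p.1 + blue))) (0, 0)
  s2.2 + s1.2

-- ===== PORT B =====
-- solve(xs) = (sum of xs, max(0, max prefix sum of xs)), by halving.
-- xs[:mid] / xs[mid:] with 0 ≤ mid ≤ len xs are exactly List.take / List.drop.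
def pvSolve : List Int → Int × Int
  | [] => (0, 0)
  | [x] => (x, max 0 x)
  | x :: y :: t =>
    let xs := x :: y :: t
    let mid := xs.length / 2
    let l := pvSolve (xs.take mid)
    let r := pvSolve (xs.drop mid)
    (l.1 + r.1, max l.2 (l.1 + r.2))
termination_by xs => xs.length
decreasing_by
  · simp [List.length_take]; omega
  · simp [List.length_drop]; omega

def maximizer_alt (reds : List Int) (blues : List Int) : Int :=
  (pvSolve reds).2 + (pvSolve blues).2

-- ===== PRECONDITION & SPEC =====
def Spec_maximizer (reds : List Int) (blues : List Int) (out : Int) : Prop := out = maximizer_alt reds blues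
instance (reds : List Int) (blues : List Int) (out : Int) : Decidable (Spec_maximizer reds blues out) := by unfold Spec_maximizer; infer_instance

-- ===== CLAIM (what is proved, stated in full; the proofs are below) =====
def Claim_equal_maximizer : Prop := ∀ (reds : List Int) (blues : List Int), Dom_maximizer reds blues → Spec_maximizer reds blues (maximizer reds blues)

-- ===== LEMMAS AND PROOFS =====
-- Reference characterisation: clamped max prefix sum, structurally.
def pvBestP : List Int → Int
  | [] => 0
  | x :: t => max 0 (x + pvBestP t)

theorem pvBestP_nonneg (l : List Int) : 0 ≤ pvBestP l := by
  cases l with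
  | nil => simp [pvBestP]
  | cons x t => simp [pvBestP]

theorem pvBestP_append (L R : List Int) :
    pvBestP (L ++ R) = max (pvBestP L) (L.sum + pvBestP R) := by
  induction L with
  | nil => have := pvBestP_nonneg R; simp [pvBestP]; omega
  | cons x t ih =>
    have := pvBestP_nonneg R
    simp [pvBestP, ih, List.sum_cons]
    omega

theorem pvSolve_eq (xs : List Int) : pvSolve xs = (xs.sum, pvBestP xs) := by
  induction xs using pvSolve.induct with
  | case1 => simp [pvSolve, pvBestP]
  | case2 x => simp [pvSolve, pvBestP]
  | case3 x y t xs mid ihl ihr =>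
    rw [pvSolve]
    rw [ihl, ihr]
    have h : (x :: y :: t) = (x :: y :: t).take ((x :: y :: t).length / 2)
        ++ (x :: y :: t).drop ((x :: y :: t).length / 2) := by
      rw [List.take_append_drop]
    conv_rhs => rw [h]
    rw [List.sum_append, pvBestP_append]

theorem foldl_pair_eq_bestP (l : List Int) (s m : Int) (h : s ≤ m) :
    (l.foldl (fun (p : Int × Int) x => (p.1 + x, max p.2 (p.1 + x))) (s, m)).2
      = max m (s + pvBestP l) := by
  induction l generalizing s m with
  | nil => simp [pvBestP]; omega
  | cons x t ih =>
    have hnn := pvBestP_nonneg t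
    have := ih (s + x) (max m (s + x)) (by omega)
    simp only [List.foldl, pvBestP] at *
    omega

-- ===== VERDICT (by name: the statement is the Claim_ definition above) =====
theorem maximizer_spec : Claim_equal_maximizer := by
  intro reds blues _
  unfold Spec_maximizer maximizer maximizer_alt
  have h1 := foldl_pair_eq_bestP reds 0 0 le_rfl
  have h2 := foldl_pair_eq_bestP blues 0 0 le_rfl
  have n1 := pvBestP_nonneg reds
  have n2 := pvBestP_nonneg blues
  simp only [pvSolve_eq, h1, h2]
  omega
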